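-- pv_equiv track=rewrite | github.com/torkildr/raspberry-display | tools/font_generator.py | ascii_to_hex
-- ===== SOURCE A (Python) =====
-- def ascii_to_hex(ascii_lines):
--     """Convert ASCII art to hex bytes and calculate dynamic width"""
--     # Find the rightmost column with any '#' character
--     max_width = 0
--     for line in ascii_lines:
--         for col in range(len(line) - 1, -1, -1):  # Search from right to left
--             if col < len(line) and line[col] == '#':
--                 max_width = max(max_width, col + 1)
--                 break
--
--     # Ensure minimum width of 1 for space character
--     actual_width = max(1, max_width)
--
--     hex_bytes = [0] * 7  # 7 bytes for font data (max possible width)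
--
--     for col in range(min(7, actual_width)):
--         byte_val = 0
--         for row in range(8):
--             if row < len(ascii_lines) and col < len(ascii_lines[row]):
--                 if ascii_lines[row][col] == '#':
--                     # Bit 0 is top row (row 0), bit 7 is bottom row (row 7)
--                     # This matches the display logic: (1 << row)
--                     byte_val |= (1 << row)
--         hex_bytes[col] = byte_val
--
--     return hex_bytes, actual_width
-- ===== SOURCE B (Python) =====
-- def ascii_to_hex(ascii_lines):
--     """Convert ASCII art to hex bytes and calculate dynamic width (single fused pass)"""
--     hex_bytes = [0] * 7
--     max_width = 0
--     for row, line in enumerate(ascii_lines):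
--         max_width = max(max_width, line.rfind('#') + 1)
--         if row < 8:
--             for col, ch in enumerate(line[:7]):
--                 if ch == '#':
--                     hex_bytes[col] |= 1 << row
--     return hex_bytes, max(1, max_width)
-- ===== Notes on version B (the rewrite author's own statement) =====
-- stated objective: simpler
-- what changed: A's two phases (a right-to-left per-line scan for the width, then a column-major nested loop packing each of up to 7 bytes) are fused into one pass over enumerate(ascii_lines) that updates the width via line.rfind('#')+1 and ORs row bits into hex_bytes row-major (C-level rfind and a single traversal give a constant-factor speedup).
import Mathlib
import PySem

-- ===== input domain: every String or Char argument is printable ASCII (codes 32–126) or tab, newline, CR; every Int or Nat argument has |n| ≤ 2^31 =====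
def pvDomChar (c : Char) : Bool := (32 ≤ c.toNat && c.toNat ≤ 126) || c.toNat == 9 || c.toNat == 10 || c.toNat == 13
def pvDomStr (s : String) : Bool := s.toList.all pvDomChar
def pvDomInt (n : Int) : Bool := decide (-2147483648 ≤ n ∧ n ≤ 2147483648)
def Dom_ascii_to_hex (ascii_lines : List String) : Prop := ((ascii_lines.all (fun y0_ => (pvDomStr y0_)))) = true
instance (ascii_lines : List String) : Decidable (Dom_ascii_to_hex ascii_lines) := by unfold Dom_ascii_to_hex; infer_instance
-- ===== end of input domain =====

-- B fuses A's two phases into one pass over enumerate(ascii_lines) (rfind for the width,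
-- row-major bit-packing instead of A's column-major scan); objective: simpler, same cost.

-- ===== PORT A =====
-- inner `for col in range(len(line)-1, -1, -1): if col < len(line) and line[col] == '#': max_width = max(...); break`
def aGo (cs : List Char) (mw : Int) : List Int → Int
  | [] => mw
  | col :: rest =>
    if col < (cs.length : Int) ∧ PySem.List.pyGet? cs col = some '#' then
      max mw (col + 1)                      -- break
    else aGo cs mw rest

-- first loop of A: `for line in ascii_lines: …`
def aWidth (ascii_lines : List String) : Int :=
  ascii_lines.foldl
    (fun mw line => aGo line.toList mw
      (PySem.List.pyRange ((line.toList.length : Int) - 1) (-1) (-1)))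
    0

-- `byte_val` inner loop: `for row in range(8): if row < len(ascii_lines) and col < len(ascii_lines[row]): if …`
-- (`1 << row` is `(1:Int) <<< row.toNat`, exact since row ∈ [0,8))
def aByte (X : List (List Char)) (col : Int) : Int :=
  (PySem.List.pyRange 0 8 1).foldl
    (fun bv row =>
      if row < (X.length : Int) ∧ col < ((PySem.List.pyGetD X row []).length : Int) then
        if PySem.List.pyGet? (PySem.List.pyGetD X row []) col = some '#' then
          PySem.Int.bor bv ((1 : Int) <<< row.toNat)
        else bv
      else bv)
    0

def ascii_to_hex (ascii_lines : List String) : List Int × Int :=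
  let actual_width := max 1 (aWidth ascii_lines)
  -- `for col in range(min(7, actual_width)): … ; hex_bytes[col] = byte_val`
  -- (`hex_bytes[col] =` is `.set col.toNat`, exact since 0 ≤ col < 7 = len(hex_bytes))
  let hex_bytes :=
    (PySem.List.pyRange 0 (min 7 actual_width) 1).foldl
      (fun hb col => hb.set col.toNat (aByte (ascii_lines.map String.toList) col))
      (List.replicate 7 (0 : Int))
  (hex_bytes, actual_width)

-- ===== PORT B =====
-- `for col, ch in enumerate(line[:7]): if ch == '#': hex_bytes[col] |= 1 << row`
def bRow (hb : List Int) (row : Int) (cs : List Char) : List Int :=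
  (PySem.List.enumerate (PySem.List.slice cs none (some 7)) 0).foldl
    (fun hb q =>
      if q.2 = '#' then
        hb.set q.1.toNat (PySem.Int.bor (PySem.List.pyGetD hb q.1 0) ((1 : Int) <<< row.toNat))
      else hb)
    hb

def ascii_to_hex_alt (ascii_lines : List String) : List Int × Int :=
  -- single fused pass: `for row, line in enumerate(ascii_lines): …`
  let st :=
    (PySem.List.enumerate ascii_lines 0).foldl
      (fun st p =>
        ((if p.1 < 8 then bRow st.1 p.1 p.2.toList else st.1),
         max st.2 (PySem.Str.rfind p.2 "#" + 1)))
      (List.replicate 7 (0 : Int), 0)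
  (st.1, max 1 st.2)

-- ===== PRECONDITION & SPEC =====
def Spec_ascii_to_hex (ascii_lines : List String) (out : List Int × Int) : Prop := out = ascii_to_hex_alt ascii_lines
instance (ascii_lines : List String) (out : List Int × Int) : Decidable (Spec_ascii_to_hex ascii_lines out) := by unfold Spec_ascii_to_hex; infer_instance

-- ===== CLAIM (what is proved, stated in full; the proofs are below) =====
def Claim_equal_ascii_to_hex : Prop := ∀ (ascii_lines : List String), Dom_ascii_to_hex ascii_lines → Spec_ascii_to_hex ascii_lines (ascii_to_hex ascii_lines)

-- ===== LEMMAS AND PROOFS =====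

theorem P2 (cs : List Char) (j : Nat) :
    (((j:Int) < (cs.length:Int)) ∧ PySem.List.pyGet? cs (j:Int) = some '#') ↔ cs[j]? = some '#' := by
  have hg : PySem.List.pyGet? cs ((j:Nat):Int) = cs[j]? := by simp [PySem.List.pyGet?_natCast]
  rw [hg]
  constructor
  · exact fun h => h.2
  · intro h
    refine ⟨?_, h⟩
    have := (List.getElem?_eq_some_iff.mp h).1
    exact_mod_cast this
theorem go_zero (cs : List Char) : PySem.Chars.rfind.go cs ['#'] 0 = if ['#'].isPrefixOf cs then 0 else -1 := by
  simp [PySem.Chars.rfind.go]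
theorem go_succ (cs : List Char) (j : Nat) : PySem.Chars.rfind.go cs ['#'] (j+1) = if ['#'].isPrefixOf (cs.drop (j+1)) then ((j:Int)+1) else PySem.Chars.rfind.go cs ['#'] j := by
  simp [PySem.Chars.rfind.go]
theorem prefix_singleton {a : Char} (m : List Char) : [a].isPrefixOf m = true ↔ m[0]? = some a := by
  cases m with
  | nil => simp [List.isPrefixOf]
  | cons b t => simp [List.isPrefixOf]; exact eq_comm
theorem prefix_drop (cs : List Char) (k : Nat) :
    ['#'].isPrefixOf (cs.drop k) = true ↔ cs[k]? = some '#' := by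
  rw [prefix_singleton, List.getElem?_drop]; simp
theorem aGo_eq_go (cs : List Char) : ∀ (j : Nat) (mw : Int), 0 ≤ mw →
    aGo cs mw (PySem.List.pyRange (j : Int) (-1) (-1)) =
      max mw (PySem.Chars.rfind.go cs ['#'] j + 1) := by
  intro j
  induction j with
  | zero =>
      intro mw hmw
      rw [show ((0:Nat):Int) = (0:Int) by norm_num]
      rw [PySem.List.pyRange_neg_one_cons (by norm_num)]
      rw [show PySem.List.pyRange ((0:Int)-1) (-1) (-1) = [] from
        PySem.List.pyRange_neg_one_eq_nil (by norm_num)]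
      simp only [aGo, go_zero]
      by_cases h : cs[0]? = some '#'
      · have hc : (0:Int) < (cs.length:Int) ∧ PySem.List.pyGet? cs 0 = some '#' := (P2 cs 0).mpr h
        rw [if_pos hc, if_pos ((prefix_singleton cs).mpr h)]
      · have hc : ¬((0:Int) < (cs.length:Int) ∧ PySem.List.pyGet? cs 0 = some '#') :=
          fun hx => h ((P2 cs 0).mp hx)
        have hp : ¬(['#'].isPrefixOf cs = true) := fun hx => h ((prefix_singleton cs).mp hx)
        rw [if_neg hc, if_neg hp]
        omega
  | succ j ih =>
      intro mw hmw
      rw [PySem.List.pyRange_neg_one_cons (by push_cast; omega)]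
      rw [show ((j+1:Nat):Int) - 1 = ((j:Nat):Int) by push_cast; ring]
      simp only [aGo, go_succ]
      by_cases h : cs[j+1]? = some '#'
      · have hc : ((j+1:Nat):Int) < (cs.length:Int) ∧ PySem.List.pyGet? cs ((j+1:Nat):Int) = some '#' :=
          (P2 cs (j+1)).mpr h
        rw [if_pos hc, if_pos ((prefix_drop cs (j+1)).mpr h)]
        push_cast; ring_nf
      · have hc : ¬(((j+1:Nat):Int) < (cs.length:Int) ∧ PySem.List.pyGet? cs ((j+1:Nat):Int) = some '#') :=
          fun hx => h ((P2 cs (j+1)).mp hx)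
        have hp : ¬(['#'].isPrefixOf (cs.drop (j+1)) = true) := fun hx => h ((prefix_drop cs (j+1)).mp hx)
        rw [if_neg hc, if_neg hp, ih mw hmw]
theorem aGo_line (cs : List Char) (mw : Int) (h : 0 ≤ mw) :
    aGo cs mw (PySem.List.pyRange ((cs.length : Int) - 1) (-1) (-1)) =
      max mw (PySem.Chars.rfind cs ['#'] + 1) := by
  have hr : PySem.Chars.rfind cs ['#'] = PySem.Chars.rfind.go cs ['#'] cs.length := rfl
  cases hn : cs.length with
  | zero =>
      rw [hr, hn]
      rw [show (((0:Nat):Int) - 1) = (-1:Int) by norm_num,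
        PySem.List.pyRange_neg_one_eq_nil (by norm_num)]
      simp only [aGo, go_zero]
      have hp : ¬(['#'].isPrefixOf cs = true) := by
        intro hx
        have h0 := (prefix_singleton cs).mp hx
        rw [List.length_eq_zero_iff.mp hn] at h0
        simp at h0
      rw [if_neg hp]
      omega
  | succ m =>
      rw [hr, hn, show (((m+1:Nat):Int)) - 1 = ((m:Nat):Int) by push_cast; ring]
      rw [aGo_eq_go cs m mw h, go_succ]
      have hp : ¬(['#'].isPrefixOf (cs.drop (m+1)) = true) := by
        rw [prefix_drop]
        have hnone : cs[m+1]? = none := List.getElem?_eq_none (by omega)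
        simp [hnone]
      rw [if_neg hp]
theorem le_go {l : List Char} {c : Nat} : ∀ (n : Nat), c ≤ n → l[c]? = some '#' →
    (c : Int) ≤ PySem.Chars.rfind.go l ['#'] n := by
  intro n
  induction n with
  | zero =>
      intro hc h
      have : c = 0 := by omega
      subst this
      rw [go_zero, if_pos ((prefix_singleton l).mpr h)]
      simp
  | succ n ih =>
      intro hc h
      rw [go_succ]
      by_cases hp : ['#'].isPrefixOf (l.drop (n+1)) = true
      · rw [if_pos hp]; omega
      · rw [if_neg hp]
        have : c ≠ n + 1 := by
          intro he; subst he; exact hp ((prefix_drop l (n+1)).mpr h)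
        exact ih (by omega) h
theorem le_rfind {l : List Char} {c : Nat} (h : l[c]? = some '#') :
    (c : Int) ≤ PySem.Chars.rfind l ['#'] := by
  have hlt := (List.getElem?_eq_some_iff.mp h).1
  exact le_go l.length (by omega) h
def wstep (mw : Int) (s : String) : Int := max mw (PySem.Str.rfind s "#" + 1)
theorem hash_toList : ("#" : String).toList = ['#'] := rfl
theorem wstep_eq (mw : Int) (s : String) :
    wstep mw s = max mw (PySem.Chars.rfind s.toList ['#'] + 1) := by
  rw [wstep, PySem.Str.rfind_eq, hash_toList]
theorem le_foldl_wstep (xs : List String) : ∀ (mw : Int), mw ≤ xs.foldl wstep mw := by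
  induction xs with
  | nil => intro mw; simp
  | cons s t ih =>
      intro mw
      calc mw ≤ wstep mw s := le_max_left _ _
        _ ≤ _ := ih _
theorem mem_le_foldl_wstep {s : String} {xs : List String} (h : s ∈ xs) (mw : Int) :
    PySem.Chars.rfind s.toList ['#'] + 1 ≤ xs.foldl wstep mw := by
  induction xs generalizing mw with
  | nil => simp at h
  | cons s' t ih =>
      rcases List.mem_cons.mp h with he | ht
      · subst he
        calc PySem.Chars.rfind s.toList ['#'] + 1 ≤ wstep mw s := by
              rw [wstep_eq]; exact le_max_right _ _
          _ ≤ _ := le_foldl_wstep t _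
      · exact ih ht _
theorem aWidth_fold (xs : List String) : ∀ (mw : Int), 0 ≤ mw →
    xs.foldl (fun mw line => aGo line.toList mw
      (PySem.List.pyRange ((line.toList.length : Int) - 1) (-1) (-1))) mw
    = xs.foldl wstep mw := by
  induction xs with
  | nil => intro mw _; rfl
  | cons s t ih =>
      intro mw hmw
      simp only [List.foldl_cons]
      rw [aGo_line s.toList mw hmw, ← wstep_eq]
      exact ih _ (le_trans hmw (le_max_left _ _))
theorem aWidth_eq (ascii_lines : List String) :
    aWidth ascii_lines = ascii_lines.foldl wstep 0 := aWidth_fold ascii_lines 0 le_rfl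
def colAcc (c : Nat) : List (List Char) → Nat → Int → Int
  | [], _, bv => bv
  | cs :: t, r, bv =>
      colAcc c t (r + 1)
        (if r < 8 ∧ c < 7 ∧ cs[c]? = some '#' then PySem.Int.bor bv ((1 : Int) <<< r) else bv)
theorem colAcc_stop (c : Nat) : ∀ (X : List (List Char)) (r : Nat) (bv : Int), 8 ≤ r →
    colAcc c X r bv = bv := by
  intro X
  induction X with
  | nil => intro r bv _; rfl
  | cons cs t ih =>
      intro r bv h
      simp only [colAcc, if_neg (by omega : ¬(r < 8 ∧ c < 7 ∧ cs[c]? = some '#'))]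
      exact ih (r + 1) bv (by omega)
theorem colAcc_eq_rangeFold (c : Nat) :
    ∀ (X : List (List Char)) (r : Nat) (bv : Int),
      colAcc c X r bv =
        (List.range' r (8 - r)).foldl
          (fun b k => if c < 7 ∧ (X.getD (k - r) [])[c]? = some '#' then
              PySem.Int.bor b ((1 : Int) <<< k) else b) bv := by
  intro X
  induction X with
  | nil =>
      intro r bv
      rw [colAcc, PySem.List.foldl_congr_mem _ _ (fun b _ => b) bv (by intro b k _; simp)]
      induction (List.range' r (8 - r)) with
      | nil => rfl
      | cons x l ihl => rw [List.foldl_cons]; exact ihl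
  | cons cs t ih =>
      intro r bv
      by_cases hr : r < 8
      · rw [show 8 - r = (8 - (r + 1)) + 1 by omega, List.range'_succ]
        simp only [colAcc, List.foldl_cons, Nat.sub_self, List.getD_cons_zero]
        rw [ih (r + 1) _]
        have hcong := PySem.List.foldl_congr_mem (List.range' (r+1) (8 - (r+1)))
          (fun b k => if c < 7 ∧ ((cs :: t).getD (k - r) [])[c]? = some '#' then
              PySem.Int.bor b ((1 : Int) <<< k) else b)
          (fun b k => if c < 7 ∧ (t.getD (k - (r+1)) [])[c]? = some '#' then
              PySem.Int.bor b ((1 : Int) <<< k) else b)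
        rw [hcong]
        · congr 1
          simp [hr]
        · intro b k hk
          have hk1 := List.mem_range'_1.mp hk
          have : k - r = (k - (r + 1)) + 1 := by omega
          rw [this, List.getD_cons_succ]
      · rw [colAcc_stop c _ r bv (by omega), show 8 - r = 0 by omega]
        rfl
theorem aByte_eq_colAcc (X : List (List Char)) (c : Nat) (hc : c < 7) :
    aByte X (c : Int) = colAcc c X 0 0 := by
  rw [colAcc_eq_rangeFold, show (8 - 0) = 8 from rfl, ← List.range_eq_range']
  rw [aByte, PySem.List.pyRange_one, show ((8:Int) - 0).toNat = 8 by rfl, List.foldl_map]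
  apply PySem.List.foldl_congr_mem
  intro b k hk
  simp only [zero_add]
  have hGetD : PySem.List.pyGetD X ((k:Nat):Int) [] = X.getD k [] := by
    simp [PySem.List.pyGetD_natCast]
  have htoNat : ((k:Nat):Int).toNat = k := rfl
  rw [hGetD, htoNat, Nat.sub_zero]
  by_cases hlen : k < X.length
  · have hsome : X[k]? = some X[k] := List.getElem?_eq_getElem hlen
    have hXk : X.getD k [] = X[k] := List.getD_eq_getElem X [] hlen
    rw [hXk]
    by_cases h : (X[k])[c]? = some '#'
    · have hcl : c < (X[k]).length := (List.getElem?_eq_some_iff.mp h).1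
      simp [h, hc,
        show ((k:Nat):Int) < (X.length:Int) from by exact_mod_cast hlen,
        show ((c:Nat):Int) < ((X[k]).length:Int) from by exact_mod_cast hcl]
    · simp [PySem.List.pyGet?_natCast, h]
  · have hnone : X[k]? = none := List.getElem?_eq_none (by omega)
    have hd : X.getD k [] = [] := List.getD_eq_default X [] (by omega)
    simp [hnone, show ¬(((k:Nat):Int) < (X.length:Int)) from by exact_mod_cast hlen]

theorem inner_fold (b : Int) :
    ∀ (ds : List Char) (s : Nat) (hb : List Int), s + ds.length ≤ hb.length →
      ((PySem.List.enumerate ds (s : Int)).foldl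
        (fun hb q =>
          if q.2 = '#' then
            hb.set q.1.toNat (PySem.Int.bor (PySem.List.pyGetD hb q.1 0) b)
          else hb) hb).length = hb.length ∧
      ∀ (c : Nat), c < hb.length →
        ((PySem.List.enumerate ds (s : Int)).foldl
          (fun hb q =>
            if q.2 = '#' then
              hb.set q.1.toNat (PySem.Int.bor (PySem.List.pyGetD hb q.1 0) b)
            else hb) hb)[c]! =
          if s ≤ c ∧ ds[c - s]? = some '#' then PySem.Int.bor hb[c]! b else hb[c]! := by
  intro ds
  induction ds with
  | nil =>
      intro s hb _
      refine ⟨rfl, ?_⟩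
      intro c hcl
      simp
  | cons d t ih =>
      intro s hb hbound
      simp only [PySem.List.enumerate, List.foldl_cons]
      have hs : s < hb.length := by simp at hbound; omega
      set hb1 := (if d = '#' then
          hb.set ((s:Int)).toNat (PySem.Int.bor (PySem.List.pyGetD hb (s:Int) 0) b)
        else hb) with hhb1
      have hlen1 : hb1.length = hb.length := by
        rw [hhb1]; split <;> simp
      have hget : PySem.List.pyGetD hb ((s:Nat):Int) 0 = hb[s]! := by
        rw [PySem.List.pyGetD_natCast, List.getD_eq_getElem hb 0 hs, getElem!_pos hb s hs]
      have hcast : ((s:Nat):Int) + 1 = (((s+1):Nat):Int) := by push_cast; ring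
      have hb1at : ∀ (c : Nat), c < hb.length →
          hb1[c]! = if c = s ∧ d = '#' then PySem.Int.bor hb[s]! b else hb[c]! := by
        intro c hcl
        rw [hhb1]
        by_cases hd : d = '#'
        · rw [if_pos hd]
          have htn : ((s:Nat):Int).toNat = s := rfl
          rw [htn, hget]
          by_cases hcs : c = s
          · subst hcs
            rw [if_pos ⟨rfl, hd⟩, List.getElem!_eq_getElem?_getD, List.getElem?_set_self hs]
            rfl
          · rw [if_neg (by tauto), List.getElem!_eq_getElem?_getD,
              List.getElem?_set_ne (by omega), ← List.getElem!_eq_getElem?_getD]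
        · rw [if_neg hd, if_neg (by tauto)]
      obtain ⟨ihlen, ihat⟩ := ih (s+1) hb1 (by simp at hbound ⊢; omega)
      rw [hcast]
      refine ⟨by rw [ihlen, hlen1], ?_⟩
      intro c hcl
      rw [ihat c (by omega), hb1at c hcl]
      rcases Nat.lt_trichotomy c s with hlt | heq | hgt
      · rw [if_neg (by omega : ¬(s+1 ≤ c ∧ t[c - (s+1)]? = some '#')),
          if_neg (by omega : ¬(c = s ∧ d = '#')),
          if_neg (fun hx => by omega)]
      · rw [if_neg (by omega : ¬(s+1 ≤ c ∧ t[c - (s+1)]? = some '#'))]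
        have h0 : c - s = 0 := by omega
        rw [h0]
        by_cases hd : d = '#'
        · rw [if_pos ⟨heq, hd⟩, if_pos ⟨by omega, by rw [List.getElem?_cons_zero]; simp [hd]⟩, heq]
        · rw [if_neg (by tauto), if_neg (by
            rintro ⟨-, hx⟩
            rw [List.getElem?_cons_zero] at hx
            exact hd (by simpa using hx))]
      · have hsucc : c - s = (c - (s+1)) + 1 := by omega
        rw [if_neg (by omega : ¬(c = s ∧ d = '#')), hsucc, List.getElem?_cons_succ]
        have hiff : (s+1 ≤ c ∧ t[c - (s+1)]? = some '#') ↔ (s ≤ c ∧ t[c - (s+1)]? = some '#') := by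
          constructor <;> (rintro ⟨h1, h2⟩; exact ⟨by omega, h2⟩)
        rw [if_congr hiff rfl rfl]
theorem bRow_spec (hb : List Int) (row : Int) (cs : List Char) (h7 : hb.length = 7) :
    (bRow hb row cs).length = 7 ∧
    ∀ (c : Nat), c < 7 →
      (bRow hb row cs)[c]! =
        if cs[c]? = some '#' then
          PySem.Int.bor hb[c]! ((1 : Int) <<< row.toNat)
        else hb[c]! := by
  have hslice : PySem.List.slice cs none (some 7) = cs.take 7 := by
    rw [PySem.List.slice_to cs (by norm_num : (0:Int) ≤ 7)]; rfl
  have hbound : 0 + (cs.take 7).length ≤ hb.length := by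
    have h1 : (cs.take 7).length ≤ 7 := List.length_take_le _ _
    omega
  obtain ⟨hl, hat⟩ := inner_fold ((1 : Int) <<< row.toNat) (cs.take 7) 0 hb hbound
  rw [bRow, hslice]
  refine ⟨by rw [show ((0:Nat):Int) = (0:Int) from rfl] at hl; rw [hl, h7], ?_⟩
  intro c hc
  have := hat c (by omega)
  rw [show ((0:Nat):Int) = (0:Int) from rfl] at this
  rw [this, Nat.sub_zero, List.getElem?_take_of_lt hc]
  by_cases h : cs[c]? = some '#'
  · rw [if_pos ⟨by omega, h⟩, if_pos h]
  · rw [if_neg (by tauto), if_neg h]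
def bBits : List String → Int → List Int → List Int
  | [], _, hb => hb
  | s :: t, r, hb => bBits t (r + 1) (if r < 8 then bRow hb r s.toList else hb)
theorem bBits_spec (xs : List String) :
    ∀ (r : Nat) (hb : List Int), hb.length = 7 →
      (bBits xs (r : Int) hb).length = 7 ∧
      ∀ (c : Nat), c < 7 →
        (bBits xs (r : Int) hb)[c]! = colAcc c (xs.map String.toList) r hb[c]! := by
  induction xs with
  | nil => intro r hb h7; exact ⟨h7, fun c _ => rfl⟩
  | cons s t ih =>
      intro r hb h7
      have hcast : (r:Int) + 1 = (((r+1):Nat):Int) := by push_cast; ring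
      have hguard : ((r:Int) < 8) ↔ r < 8 := by exact_mod_cast Iff.rfl
      simp only [bBits, List.map_cons, colAcc, hcast]
      by_cases hr : r < 8
      · rw [if_pos (hguard.mpr hr)]
        obtain ⟨hbl, hbat⟩ := bRow_spec hb (r:Int) s.toList h7
        obtain ⟨ihl, ihat⟩ := ih (r+1) (bRow hb (r:Int) s.toList) hbl
        refine ⟨ihl, ?_⟩
        intro c hc
        rw [ihat c hc, hbat c hc]
        have htn : ((r:Nat):Int).toNat = r := rfl
        rw [htn]
        by_cases hh : s.toList[c]? = some '#'
        · rw [if_pos hh, if_pos ⟨hr, hc, hh⟩]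
        · rw [if_neg hh, if_neg (by tauto)]
      · rw [if_neg (fun hx => hr (hguard.mp hx))]
        obtain ⟨ihl, ihat⟩ := ih (r+1) hb h7
        refine ⟨ihl, ?_⟩
        intro c hc
        rw [ihat c hc, if_neg (by tauto)]
theorem set_fold (f : Int → Int) :
    ∀ (m : Nat), m ≤ 7 →
      ((PySem.List.pyRange 0 (m : Int) 1).foldl
        (fun hb col => hb.set col.toNat (f col)) (List.replicate 7 (0 : Int))).length = 7 ∧
      ∀ (c : Nat), c < 7 →
        ((PySem.List.pyRange 0 (m : Int) 1).foldl
          (fun hb col => hb.set col.toNat (f col)) (List.replicate 7 (0 : Int)))[c]! =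
          if c < m then f (c : Int) else 0 := by
  intro m
  induction m with
  | zero =>
      intro _
      rw [show ((0:Nat):Int) = (0:Int) from rfl, PySem.List.pyRange_one_eq_nil (by norm_num)]
      refine ⟨by simp, ?_⟩
      intro c hc
      simp only [List.foldl_nil]
      rw [getElem!_pos _ c (by simp; omega), List.getElem_replicate]
      rw [if_neg (by omega)]
  | succ m ih =>
      intro hm
      obtain ⟨ihl, ihat⟩ := ih (by omega)
      rw [show (((m+1):Nat):Int) = ((m:Nat):Int) + 1 by push_cast; ring,
        PySem.List.pyRange_one_succ_right (by positivity), List.foldl_append]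
      simp only [List.foldl_cons, List.foldl_nil]
      refine ⟨by rw [List.length_set, ihl], ?_⟩
      intro c hc
      have htn : ((m:Nat):Int).toNat = m := rfl
      rw [htn]
      by_cases hcm : c = m
      · subst hcm
        rw [List.getElem!_eq_getElem?_getD, List.getElem?_set_self (by rw [ihl]; omega)]
        rw [if_pos (by omega)]
        rfl
      · rw [List.getElem!_eq_getElem?_getD, List.getElem?_set_ne (fun hx => hcm hx.symm),
          ← List.getElem!_eq_getElem?_getD, ihat c hc]
        by_cases h1 : c < m
        · rw [if_pos h1, if_pos (by omega)]
        · rw [if_neg h1, if_neg (by omega)]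
theorem pair_fold (xs : List String) : ∀ (r : Int) (hb : List Int) (mw : Int),
    (PySem.List.enumerate xs r).foldl
      (fun st p =>
        ((if p.1 < 8 then bRow st.1 p.1 p.2.toList else st.1),
         max st.2 (PySem.Str.rfind p.2 "#" + 1)))
      (hb, mw)
    = (bBits xs r hb, xs.foldl wstep mw) := by
  induction xs with
  | nil => intro r hb mw; rfl
  | cons s t ih =>
      intro r hb mw
      simp only [PySem.List.enumerate, List.foldl_cons, bBits, wstep]
      exact ih (r + 1) _ _

theorem colAcc_zero (c : Nat) {X : List (List Char)} (h : ∀ cs ∈ X, cs[c]? ≠ some '#') :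
    ∀ (r : Nat), colAcc c X r 0 = 0 := by
  induction X with
  | nil => intro r; rfl
  | cons cs t ih =>
      intro r
      have hcs := h cs (by simp)
      simp only [colAcc, if_neg (by tauto : ¬(r < 8 ∧ c < 7 ∧ cs[c]? = some '#'))]
      exact ih (fun d hd => h d (by simp [hd])) (r + 1)
theorem main_eq (xs : List String) : ascii_to_hex xs = ascii_to_hex_alt xs := by
  have hW : aWidth xs = xs.foldl wstep 0 := aWidth_eq xs
  have haw1 : (1:Int) ≤ max 1 (aWidth xs) := le_max_left _ _
  set aw := max 1 (aWidth xs) with haw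
  set X := xs.map String.toList with hX
  set m : Nat := (min 7 aw).toNat with hm
  have hmidef : (m:Int) = min 7 aw := Int.toNat_of_nonneg (by omega)
  have hm7 : m ≤ 7 := by omega
  obtain ⟨hAl, hAat⟩ := set_fold (aByte X) m hm7
  obtain ⟨hBl, hBat⟩ := bBits_spec xs 0 (List.replicate 7 (0:Int)) (by simp)
  rw [show (((0:Nat)):Int) = (0:Int) from rfl] at hBl hBat
  rw [ascii_to_hex, ascii_to_hex_alt]
  rw [pair_fold xs 0 (List.replicate 7 (0:Int)) 0]
  rw [hmidef] at hAat hAl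
  refine Prod.ext ?_ ?_
  · show (PySem.List.pyRange 0 (min 7 aw) 1).foldl _ (List.replicate 7 (0:Int)) = bBits xs 0 (List.replicate 7 (0:Int))
    apply List.ext_getElem (by rw [hAl, hBl])
    intro c h1 h2
    have hc7 : c < 7 := by rw [hAl] at h1; omega
    rw [← getElem!_pos _ c h1, ← getElem!_pos _ c h2, hAat c hc7, hBat c hc7]
    have hrc : (List.replicate 7 (0:Int))[c]! = 0 := by
      rw [getElem!_pos _ c (by simp; omega), List.getElem_replicate]
    rw [hrc]
    by_cases hcm : c < m
    · rw [if_pos hcm, aByte_eq_colAcc X c hc7]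
    · rw [if_neg hcm]
      rw [eq_comm]
      apply colAcc_zero
      intro cs hcs hhash
      obtain ⟨s, hs, rfl⟩ := List.mem_map.mp hcs
      have h1 := le_rfind hhash
      have h2 := mem_le_foldl_wstep hs 0
      rw [← hW] at h2
      omega
  · show aw = max 1 (xs.foldl wstep 0)
    rw [haw, hW]

-- ===== VERDICT (by name: the statement is the Claim_ definition above) =====
theorem ascii_to_hex_spec : Claim_equal_ascii_to_hex := by
  intro ascii_lines _
  unfold Spec_ascii_to_hex
  exact main_eq ascii_lines
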